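-- pv_equiv track=rewrite | github.com/raeufroushangar/HIV_pipeline | config/pol_region_coordinates_finder.py | extracting_seq_within_pol_region
-- ===== SOURCE A (Python) =====
-- def extracting_seq_within_pol_region(ref_seq, query_seq, ref_seq_pol_start_coord, ref_seq_pol_end_coord):
--     """
--     Extracts subsequences from reference and query sequences based on pol region start and end coordinates.
--
--     Parameters:
--     - ref_seq (str): Reference DNA sequence.
--     - query_seq (str): Query DNA sequence.
--     - ref_seq_pol_start_coord (int): start coordinate for the pol-region in the reference sequence.
--     - ref_seq_pol_end_coord (int):End coordinate for the pol-region in the reference sequence.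
--
--     Returns:
--     - Tuple of extracted reference sequence, extracted query sequence, start position in query, end position in query.
--     """
--     if len(ref_seq) != len(query_seq):
--         return "ref_seq and query_seq must have the same length."
--
--     current_position_ref = 0  # current position tracker for the reference sequence
--
--     start_coord_reached = False
--     end_coord_reached = False
--
--     query_pol_start_coord = 0
--     query_pol_end_coord = 0
--
--     extracted_ref_seq = ""
--
--     # Iterate through the reference sequence
--     for base in ref_seq:
--         if not start_coord_reached:
--             query_pol_start_coord += 1
--         if not end_coord_reached:
--             query_pol_end_coord += 1
--         if base != '-':
--             current_position_ref += 1
--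
--         # Check if the current position matches the start coordinate
--         if current_position_ref == ref_seq_pol_start_coord:
--             start_coord_reached = True
--         # If the start coordinate is reached, extract the reference sequence
--         if start_coord_reached:
--             extracted_ref_seq += base
--             # Check if the current position matches the end coordinate
--             if current_position_ref == ref_seq_pol_end_coord:
--                 end_coord_reached = True
--                 break
--
--     # Extract the corresponding region from the query sequence
--     extracted_query_seq = query_seq[query_pol_start_coord-1:query_pol_end_coord]
--
--     return extracted_ref_seq, extracted_query_seq, query_pol_start_coord, query_pol_end_coord
-- ===== SOURCE B (Python) =====
-- def extracting_seq_within_pol_region(ref_seq, query_seq, ref_seq_pol_start_coord, ref_seq_pol_end_coord):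
--     if len(ref_seq) != len(query_seq):
--         return "ref_seq and query_seq must have the same length."
--
--     n = len(ref_seq)
--     # one pass: cumulative count of ungapped bases at each alignment index
--     cum = []
--     c = 0
--     for base in ref_seq:
--         if base != '-':
--             c += 1
--         cum.append(c)
--
--     start_idx = next((i for i in range(n) if cum[i] == ref_seq_pol_start_coord), n)
--     end_idx = next((i for i in range(start_idx, n) if cum[i] == ref_seq_pol_end_coord), n)
--
--     query_pol_start_coord = min(start_idx + 1, n)
--     query_pol_end_coord = min(end_idx + 1, n)
--
--     extracted_ref_seq = ref_seq[start_idx:end_idx + 1]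
--     extracted_query_seq = query_seq[query_pol_start_coord - 1:query_pol_end_coord]
--
--     return extracted_ref_seq, extracted_query_seq, query_pol_start_coord, query_pol_end_coord
-- ===== Notes on version B (the rewrite author's own statement) =====
-- stated objective: alternative
-- what changed: Replaces A's single stateful scan (flags, counters and character-by-character string accumulation) by a prefix-count pass over the alignment followed by two index searches and plain slicing of ref_seq/query_seq.
import Mathlib
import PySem

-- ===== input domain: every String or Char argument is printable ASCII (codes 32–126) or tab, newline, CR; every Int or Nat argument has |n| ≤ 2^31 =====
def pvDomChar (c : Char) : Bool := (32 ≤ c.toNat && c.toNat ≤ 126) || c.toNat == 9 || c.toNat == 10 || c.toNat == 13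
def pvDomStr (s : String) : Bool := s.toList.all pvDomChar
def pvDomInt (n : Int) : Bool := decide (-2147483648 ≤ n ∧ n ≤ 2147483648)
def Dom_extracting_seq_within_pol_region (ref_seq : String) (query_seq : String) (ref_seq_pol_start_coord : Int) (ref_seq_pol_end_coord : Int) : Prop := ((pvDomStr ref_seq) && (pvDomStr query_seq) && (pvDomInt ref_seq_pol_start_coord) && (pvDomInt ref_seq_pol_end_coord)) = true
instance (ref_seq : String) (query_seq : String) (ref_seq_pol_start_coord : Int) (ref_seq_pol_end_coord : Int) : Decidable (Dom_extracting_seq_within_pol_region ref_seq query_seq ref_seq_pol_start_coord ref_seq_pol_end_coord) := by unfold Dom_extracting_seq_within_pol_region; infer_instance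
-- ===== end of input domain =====

-- B replaces A's stateful flag-and-counter scan by a prefix-count pass plus two index
-- searches and slicing (a different decomposition of the same extraction; same cost class).

-- ===== PORT A =====
-- A's for-loop with its mutable state (current_position_ref, start/end flags, the two
-- 1-based counters and the accumulated extracted_ref_seq); the early `break` is the
-- first return branch.  `query_pol_end_coord += 1` runs unconditionally while the loop
-- runs, because end_coord_reached is set only together with the break.
def pvALoop (sC eC : Int) : List Char → Int → Bool → Int → Int → List Char → Int × Int × List Char
  | [], _, _, qs, qe, acc => (qs, qe, acc)
  | b :: rest, cur, startR, qs, qe, acc =>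
    let qs' := if startR then qs else qs + 1
    let qe' := qe + 1
    let cur' := if b = '-' then cur else cur + 1
    let startR' := if cur' = sC then true else startR
    if startR' then
      (if cur' = eC then (qs', qe', acc ++ [b])
       else pvALoop sC eC rest cur' startR' qs' qe' (acc ++ [b]))
    else pvALoop sC eC rest cur' startR' qs' qe' acc

def extracting_seq_within_pol_region (ref_seq : String) (query_seq : String) (ref_seq_pol_start_coord : Int) (ref_seq_pol_end_coord : Int) : String × String × Int × Int :=
  if ref_seq.toList.length ≠ query_seq.toList.length then ("", "", 0, 0)  -- Python returns an error STRING here; outside Pre_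
  else
    let r := pvALoop ref_seq_pol_start_coord ref_seq_pol_end_coord ref_seq.toList 0 false 0 0 []
    let extQ := PySem.List.slice query_seq.toList (some (r.1 - 1)) (some r.2.1)
    (String.ofList r.2.2, String.ofList extQ, r.1, r.2.1)

-- ===== PORT B =====
-- cumulative ungapped-base count per alignment index (B's first loop)
def pvCum : List Char → Int → List Int
  | [], _ => []
  | b :: rest, c =>
    let c' := if b = '-' then c else c + 1
    c' :: pvCum rest c'

-- first index in the list holding t (B's `next(... for i in range(...) ...)`)
def pvFirstIdx : List Int → Int → Option Nat
  | [], _ => none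
  | x :: rest, t => if x = t then some 0 else (pvFirstIdx rest t).map (· + 1)

def extracting_seq_within_pol_region_alt (ref_seq : String) (query_seq : String) (ref_seq_pol_start_coord : Int) (ref_seq_pol_end_coord : Int) : String × String × Int × Int :=
  if ref_seq.toList.length ≠ query_seq.toList.length then ("", "", 0, 0)  -- Python returns an error STRING here; outside Pre_
  else
    let l := ref_seq.toList
    let n := l.length
    let cum := pvCum l 0
    let si := (pvFirstIdx cum ref_seq_pol_start_coord).getD n
    let ei := si + (pvFirstIdx (cum.drop si) ref_seq_pol_end_coord).getD (n - si)
    let qs : Int := ((min (si + 1) n : Nat) : Int)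
    let qe : Int := ((min (ei + 1) n : Nat) : Int)
    let extR := (l.drop si).take (ei + 1 - si)
    let extQ := PySem.List.slice query_seq.toList (some (qs - 1)) (some qe)
    (String.ofList extR, String.ofList extQ, qs, qe)

-- ===== PRECONDITION & SPEC =====
-- Pre_ excludes only mismatched lengths, where Python A returns an error STRING
-- instead of a tuple (no value of the declared return type).
def Pre_extracting_seq_within_pol_region (ref_seq : String) (query_seq : String) (ref_seq_pol_start_coord : Int) (ref_seq_pol_end_coord : Int) : Prop :=
  ref_seq.toList.length = query_seq.toList.length

instance (ref_seq : String) (query_seq : String) (ref_seq_pol_start_coord : Int) (ref_seq_pol_end_coord : Int) : Decidable (Pre_extracting_seq_within_pol_region ref_seq query_seq ref_seq_pol_start_coord ref_seq_pol_end_coord) := by unfold Pre_extracting_seq_within_pol_region; infer_instance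

def pvWitness_extracting_seq_within_pol_region : String × String × Int × Int := ("AC-GT", "A-CGT", 2, 4)

def Spec_extracting_seq_within_pol_region (ref_seq : String) (query_seq : String) (ref_seq_pol_start_coord : Int) (ref_seq_pol_end_coord : Int) (out : String × String × Int × Int) : Prop := out = extracting_seq_within_pol_region_alt ref_seq query_seq ref_seq_pol_start_coord ref_seq_pol_end_coord
instance (ref_seq : String) (query_seq : String) (ref_seq_pol_start_coord : Int) (ref_seq_pol_end_coord : Int) (out : String × String × Int × Int) : Decidable (Spec_extracting_seq_within_pol_region ref_seq query_seq ref_seq_pol_start_coord ref_seq_pol_end_coord out) := by unfold Spec_extracting_seq_within_pol_region; infer_instance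

-- ===== CLAIM (what is proved, stated in full; the proofs are below) =====
def Claim_equal_extracting_seq_within_pol_region : Prop := ∀ (ref_seq : String) (query_seq : String) (ref_seq_pol_start_coord : Int) (ref_seq_pol_end_coord : Int), Dom_extracting_seq_within_pol_region ref_seq query_seq ref_seq_pol_start_coord ref_seq_pol_end_coord → Pre_extracting_seq_within_pol_region ref_seq query_seq ref_seq_pol_start_coord ref_seq_pol_end_coord → Spec_extracting_seq_within_pol_region ref_seq query_seq ref_seq_pol_start_coord ref_seq_pol_end_coord (extracting_seq_within_pol_region ref_seq query_seq ref_seq_pol_start_coord ref_seq_pol_end_coord)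

-- ===== LEMMAS AND PROOFS =====

lemma pvFirstIdx_lt_length {l : List Int} {t : Int} {j : Nat} (h : pvFirstIdx l t = some j) :
    j < l.length := by
  induction l generalizing j with
  | nil => simp [pvFirstIdx] at h
  | cons x rest ih =>
    simp only [pvFirstIdx] at h
    split at h
    · simp only [Option.some.injEq] at h
      simp [← h]
    · cases hr : pvFirstIdx rest t with
      | none => rw [hr] at h; simp at h
      | some j' =>
        rw [hr] at h
        simp only [Option.map_some, Option.some.injEq] at h
        have := ih hr
        simp only [List.length_cons]
        omega

lemma pvCum_length (l : List Char) (c : Int) : (pvCum l c).length = l.length := by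
  induction l generalizing c with
  | nil => rfl
  | cons b rest ih => simp [pvCum, ih]

-- phase 2 of A's loop: start flag set; only the end search remains
lemma pvALoop_true (sC eC : Int) (l : List Char) (cur qs qe : Int) (acc : List Char) :
    pvALoop sC eC l cur true qs qe acc =
      (qs, qe + ((min ((pvFirstIdx (pvCum l cur) eC).getD l.length + 1) l.length : Nat) : Int),
        acc ++ l.take ((pvFirstIdx (pvCum l cur) eC).getD l.length + 1)) := by
  induction l generalizing cur qs qe acc with
  | nil => simp [pvALoop, pvCum, pvFirstIdx]
  | cons b rest ih =>
    simp only [pvALoop, pvCum, pvFirstIdx, ite_self, if_true]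
    generalize (if b = '-' then cur else cur + 1) = c'
    by_cases he : c' = eC
    · subst he
      simp [List.length_cons]
    · simp only [if_neg he]
      rw [ih]
      cases hr : pvFirstIdx (pvCum rest c') eC with
      | none =>
        simp only [Option.map_none, Option.getD_none, List.length_cons]
        have hlen := pvCum_length rest c'
        refine Prod.ext rfl (Prod.ext ?_ ?_)
        · dsimp only; push_cast; omega
        · simp
      | some j =>
        have hj : j < rest.length := by
          have := pvFirstIdx_lt_length hr
          rwa [pvCum_length] at this
        simp only [Option.map_some, Option.getD_some, List.length_cons]
        refine Prod.ext rfl (Prod.ext ?_ ?_)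
        · dsimp only; push_cast; omega
        · simp [List.take_succ_cons]

-- phase 1 of A's loop: start flag not yet set; relates the whole loop to B's two searches
lemma pvALoop_false (sC eC : Int) (l : List Char) (cur qs qe : Int) (acc : List Char) :
    pvALoop sC eC l cur false qs qe acc =
      (qs + ((min ((pvFirstIdx (pvCum l cur) sC).getD l.length + 1) l.length : Nat) : Int),
       qe + ((min (((pvFirstIdx (pvCum l cur) sC).getD l.length +
              (pvFirstIdx ((pvCum l cur).drop ((pvFirstIdx (pvCum l cur) sC).getD l.length)) eC).getD
                (l.length - (pvFirstIdx (pvCum l cur) sC).getD l.length)) + 1) l.length : Nat) : Int),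
       acc ++ (l.drop ((pvFirstIdx (pvCum l cur) sC).getD l.length)).take
         (((pvFirstIdx (pvCum l cur) sC).getD l.length +
           (pvFirstIdx ((pvCum l cur).drop ((pvFirstIdx (pvCum l cur) sC).getD l.length)) eC).getD
             (l.length - (pvFirstIdx (pvCum l cur) sC).getD l.length)) + 1
          - (pvFirstIdx (pvCum l cur) sC).getD l.length)) := by
  induction l generalizing cur qs qe acc with
  | nil => simp [pvALoop, pvCum, pvFirstIdx]
  | cons b rest ih =>
    simp only [pvALoop, pvCum, pvFirstIdx, Bool.false_eq_true, if_false]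
    generalize (if b = '-' then cur else cur + 1) = c'
    by_cases hs : c' = sC
    · -- start found at the head: si = 0
      subst hs
      simp only [if_true, Option.getD_some, List.drop_zero, Nat.zero_add,
        Nat.sub_zero, List.length_cons]
      by_cases he : c' = eC
      · subst he
        simp [pvFirstIdx]
      · rw [if_neg he]
        rw [pvALoop_true]
        simp only [pvFirstIdx, if_neg he]
        cases hr : pvFirstIdx (pvCum rest c') eC with
        | none =>
          simp only [Option.map_none, Option.getD_none]
          have hlen := pvCum_length rest c'
          refine Prod.ext ?_ (Prod.ext ?_ ?_)
          · dsimp only; push_cast; omega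
          · dsimp only; push_cast; omega
          · simp
        | some k =>
          have hk : k < rest.length := by
            have := pvFirstIdx_lt_length hr
            rwa [pvCum_length] at this
          simp only [Option.map_some, Option.getD_some]
          refine Prod.ext ?_ (Prod.ext ?_ ?_)
          · dsimp only; push_cast; omega
          · dsimp only; push_cast; omega
          · simp [List.take_succ_cons]
    · -- head does not reach the start coordinate
      simp only [if_neg hs, Bool.false_eq_true, if_false]
      rw [ih]
      cases hrs : pvFirstIdx (pvCum rest c') sC with
      | none =>
        -- start never found: si = n in both phrasings
        have hlen := pvCum_length rest c'
        simp only [Option.map_none, Option.getD_none, List.length_cons]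
        have hdrop : (pvCum rest c').drop rest.length = [] :=
          List.drop_eq_nil_of_le (by omega)
        have hdrop' : (c' :: pvCum rest c').drop (rest.length + 1) = [] :=
          List.drop_eq_nil_of_le (by simp; omega)
        rw [hdrop, hdrop']
        simp only [pvFirstIdx, Option.getD_none, Nat.sub_self]
        refine Prod.ext ?_ (Prod.ext ?_ ?_)
        · dsimp only; push_cast; omega
        · dsimp only; push_cast; omega
        · have h1 : rest.drop rest.length = [] := by simp
          have h2 : (b :: rest).drop (rest.length + 1) = [] := by simp
          rw [h1, h2]; simp
      | some j =>
        have hj : j < rest.length := by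
          have := pvFirstIdx_lt_length hrs
          rwa [pvCum_length] at this
        simp only [Option.map_some, Option.getD_some, List.length_cons]
        have hdropeq : (c' :: pvCum rest c').drop (j + 1) = (pvCum rest c').drop j := by
          simp [List.drop_succ_cons]
        rw [hdropeq]
        have hsub : rest.length + 1 - (j + 1) = rest.length - j := by omega
        rw [hsub]
        have hdropl : (b :: rest).drop (j + 1) = rest.drop j := by simp [List.drop_succ_cons]
        cases hre : pvFirstIdx ((pvCum rest c').drop j) eC with
        | none =>
          simp only [Option.getD_none]
          refine Prod.ext ?_ (Prod.ext ?_ ?_)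
          · dsimp only; push_cast; omega
          · dsimp only; push_cast; omega
          · rw [hdropl]; dsimp only; congr 2; omega
        | some k =>
          have hk : k < rest.length - j := by
            have := pvFirstIdx_lt_length hre
            rwa [List.length_drop, pvCum_length] at this
          simp only [Option.getD_some]
          refine Prod.ext ?_ (Prod.ext ?_ ?_)
          · dsimp only; push_cast; omega
          · dsimp only; push_cast; omega
          · rw [hdropl]; dsimp only; congr 2; omega

-- ===== VERDICT (by name: the statement is the Claim_ definition above) =====
theorem extracting_seq_within_pol_region_spec : Claim_equal_extracting_seq_within_pol_region := by
  intro ref_seq query_seq sC eC _ hpre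
  unfold Spec_extracting_seq_within_pol_region
  unfold extracting_seq_within_pol_region extracting_seq_within_pol_region_alt
  rw [if_neg (by simpa [Pre_extracting_seq_within_pol_region] using hpre),
      if_neg (by simpa [Pre_extracting_seq_within_pol_region] using hpre)]
  simp only
  rw [pvALoop_false]
  simp
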